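-- pv_equiv track=rewrite | github.com/Nirebl/Automatic_compression_of_CNN | NCNN_Compression/xtrim/trim/lowrank.py | _is_stem_layer
-- ===== SOURCE A (Python) =====
-- def _is_stem_layer(name: str) -> bool:
--     parts = name.split(".")
--     for i, p in enumerate(parts):
--         if p == "model" and i + 1 < len(parts) and parts[i + 1] == "0":
--             return True
--     if parts[0] == "0":
--         return True
--     return False
-- ===== SOURCE B (Python) =====
-- def _is_stem_layer(name: str) -> bool:
--     s = "." + name + "."
--     return ".model.0." in s or s.startswith(".0.")
-- ===== Notes on version B (the rewrite author's own statement) =====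
-- stated objective: simpler
-- what changed: Instead of splitting the name on '.' and scanning the parts by index, B wraps the name in sentinel dots and answers with one substring test '.model.0.' in s plus a prefix test s.startswith('.0.'); no list of parts is built.
import Mathlib
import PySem

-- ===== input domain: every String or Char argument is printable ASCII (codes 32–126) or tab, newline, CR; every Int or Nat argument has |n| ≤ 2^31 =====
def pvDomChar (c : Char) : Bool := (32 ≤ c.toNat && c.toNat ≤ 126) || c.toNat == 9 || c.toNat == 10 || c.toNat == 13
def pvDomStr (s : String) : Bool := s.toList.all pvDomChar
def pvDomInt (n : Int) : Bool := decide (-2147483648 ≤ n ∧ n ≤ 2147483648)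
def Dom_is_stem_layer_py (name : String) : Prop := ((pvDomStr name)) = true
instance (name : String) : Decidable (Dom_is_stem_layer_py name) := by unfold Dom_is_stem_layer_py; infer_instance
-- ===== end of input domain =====

-- B replaces A's split-on-'.' plus indexed scan of the parts by a single sentinel-wrapped
-- substring test ('.model.0.' in '.'+name+'.') and a prefix test; return value only, no side effects.

-- ===== PORT A =====
-- the 'for i, p in enumerate(parts)' loop with its early return
def aLoop (parts : List String) : List (Int × String) → Bool
  | [] => false
  | (i, p) :: rest =>
      if p = "model" ∧ i + 1 < (parts.length : Int) ∧ PySem.List.pyGetD parts (i + 1) "" = "0"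
      then true
      else aLoop parts rest

def is_stem_layer_py (name : String) : Bool :=
  match PySem.Str.split? name "." with
  | some parts =>
      if aLoop parts (PySem.List.enumerate parts) then true
      else if PySem.List.pyGetD parts 0 "" = "0" then true  -- parts[0]: split never returns [], so no IndexError
      else false
  | none => false  -- unreachable: the separator "." is nonempty

-- ===== PORT B =====
def is_stem_layer_py_alt (name : String) : Bool :=
  let s := "." ++ name ++ "."
  PySem.Str.isIn ".model.0." s || PySem.Str.startswith s ".0."

-- ===== PRECONDITION & SPEC =====
def Spec_is_stem_layer_py (name : String) (out : Bool) : Prop := out = is_stem_layer_py_alt name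
instance (name : String) (out : Bool) : Decidable (Spec_is_stem_layer_py name out) := by unfold Spec_is_stem_layer_py; infer_instance

-- ===== CLAIM (what is proved, stated in full; the proofs are below) =====
def Claim_equal_is_stem_layer_py : Prop := ∀ (name : String), Dom_is_stem_layer_py name → Spec_is_stem_layer_py name (is_stem_layer_py name)

-- ===== LEMMAS AND PROOFS =====

-- clean recursive form of Chars.splitOn on the single-character separator '.'
def splitDot : List Char → List (List Char)
  | [] => [[]]
  | c :: r => if c = '.' then [] :: splitDot r
              else match splitDot r with
                   | p :: ps => (c :: p) :: ps
                   | [] => [[c]]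

def prependPart (c : List Char) : List (List Char) → List (List Char)
  | p :: ps => (c ++ p) :: ps
  | [] => [c]

-- the sentinel-wrapped string as a function of the parts
def glue : List (List Char) → List Char
  | [] => ['.']
  | p :: ps => '.' :: (p ++ glue ps)

-- "some adjacent pair of parts is (model, 0)"
def adjB : List (List Char) → Bool
  | a :: b :: r => (a == "model".toList && b == "0".toList) || adjB (b :: r)
  | _ => false

def dotFree (p : List Char) : Prop := '.' ∉ p

theorem splitDot_ne_nil (cs : List Char) : splitDot cs ≠ [] := by
  cases cs with
  | nil => simp [splitDot]
  | cons c r =>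
      simp only [splitDot]
      split_ifs
      · simp
      · cases h : splitDot r <;> simp

theorem go_eq (fuel : Nat) (l cur acc : _) (h : l.length < fuel) :
    PySem.Chars.splitOn.go ['.'] fuel l cur acc
      = acc.reverse ++ prependPart cur.reverse (splitDot l) := by
  induction fuel generalizing l cur acc with
  | zero => omega
  | succ fuel ih =>
      cases l with
      | nil => simp [PySem.Chars.splitOn.go, splitDot, prependPart]
      | cons c rest =>
          have hstep : PySem.Chars.splitOn.go ['.'] (fuel+1) (c :: rest) cur acc =
              if ['.'].isPrefixOf (c :: rest) = true then
                PySem.Chars.splitOn.go ['.'] fuel (List.drop 1 (c :: rest)) [] (cur.reverse :: acc)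
              else PySem.Chars.splitOn.go ['.'] fuel rest (c :: cur) acc := rfl
          rw [hstep]
          have hlen : rest.length < fuel := by simp at h; omega
          by_cases hc : c = '.'
          · rw [if_pos (by simp [List.isPrefixOf, hc])]
            rw [show List.drop 1 (c :: rest) = rest from rfl]
            rw [ih rest [] (cur.reverse :: acc) hlen]
            simp only [splitDot, if_pos hc]
            cases hs : splitDot rest with
            | nil => exact absurd hs (splitDot_ne_nil rest)
            | cons p ps => simp [prependPart]
          · rw [if_neg (by simp [List.isPrefixOf]; exact fun h' => hc h'.symm)]
            rw [ih rest (c :: cur) acc hlen]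
            simp only [splitDot, if_neg hc]
            cases hs : splitDot rest with
            | nil => exact absurd hs (splitDot_ne_nil rest)
            | cons p ps => simp [prependPart]

theorem splitOn_eq_splitDot (cs : List Char) : PySem.Chars.splitOn cs ['.'] = splitDot cs := by
  show PySem.Chars.splitOn.go ['.'] (cs.length + 1) cs [] [] = _
  rw [go_eq (cs.length + 1) cs [] [] (by omega)]
  cases h : splitDot cs with
  | nil => exact absurd h (splitDot_ne_nil cs)
  | cons p ps => simp [prependPart]

theorem splitDot_dotFree (cs : List Char) : ∀ p ∈ splitDot cs, dotFree p := by
  induction cs with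
  | nil => simp [splitDot, dotFree]
  | cons c r ih =>
      simp only [splitDot]
      split_ifs with hc
      · intro p hp
        rcases List.mem_cons.mp hp with rfl | hp
        · simp [dotFree]
        · exact ih _ (by simpa using hp)
      · cases h : splitDot r with
        | nil => exact absurd h (splitDot_ne_nil r)
        | cons q qs =>
            intro p hp
            rcases List.mem_cons.mp hp with rfl | hp
            · have hq : dotFree q := ih q (by simp [h])
              simp only [dotFree, List.mem_cons] at *
              rintro (h1 | h1)
              · exact hc h1.symm
              · exact hq h1
            · exact ih _ (by simp [h, List.mem_cons]; right; simpa using hp)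

theorem glue_splitDot (cs : List Char) : glue (splitDot cs) = '.' :: (cs ++ ['.']) := by
  induction cs with
  | nil => simp [splitDot, glue]
  | cons c r ih =>
      simp only [splitDot]
      split_ifs with hc
      · subst hc; simp [glue, ih]
      · cases h : splitDot r with
        | nil => exact absurd h (splitDot_ne_nil r)
        | cons p ps =>
            rw [h] at ih
            simp only [glue] at ih ⊢
            have : p ++ glue ps = r ++ ['.'] := by
              have := List.cons.injEq '.' (p ++ glue ps) '.' (r ++ ['.']) ▸ ih
              simpa using ih
            simp [this]

theorem glue_head (parts : List (List Char)) : ∃ u, glue parts = '.' :: u := by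
  cases parts <;> exact ⟨_, rfl⟩

-- P: matching a dot-free word followed by '.' against a dot-free part followed by the glued rest
theorem prefix_wordDot (a : List Char) (w z : List Char) (rest : List (List Char))
    (ha : dotFree a) (hw : dotFree w) :
    (w ++ '.' :: z) <+: (a ++ glue rest) ↔ (a = w ∧ ('.' :: z) <+: glue rest) := by
  induction a generalizing w with
  | nil =>
      cases w with
      | nil => simp
      | cons d w' =>
          obtain ⟨u, hu⟩ := glue_head rest
          have hd : d ≠ '.' := fun h => hw (h ▸ List.mem_cons_self)
          simp only [List.nil_append, hu, List.cons_append, List.cons_prefix_cons]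
          constructor
          · rintro ⟨h1, -⟩; exact absurd h1 hd
          · rintro ⟨h1, -⟩; simp at h1
  | cons c a' ih =>
      have hc : c ≠ '.' := fun h => ha (h ▸ List.mem_cons_self)
      cases w with
      | nil =>
          simp only [List.nil_append, List.cons_append, List.cons_prefix_cons]
          constructor
          · rintro ⟨h1, -⟩; exact absurd h1.symm hc
          · rintro ⟨h1, -⟩; exact absurd h1 (by simp)
      | cons d w' =>
          have ha' : dotFree a' := fun h => ha (List.mem_cons_of_mem _ h)
          have hw' : dotFree w' := fun h => hw (List.mem_cons_of_mem _ h)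
          simp only [List.cons_append, List.cons_prefix_cons]
          rw [ih w' ha' hw']
          constructor
          · rintro ⟨h1, h2, h3⟩; exact ⟨by simp [h1, h2], h3⟩
          · rintro ⟨h1, h3⟩
            simp only [List.cons.injEq] at h1
            exact ⟨h1.1.symm, h1.2, h3⟩

-- Q: the prefix test
theorem startswith_glue (parts : List (List Char)) (h : ∀ p ∈ parts, dotFree p) :
    ['.', '0', '.'] <+: glue parts ↔ parts.head? = some ['0'] := by
  cases parts with
  | nil => simp [glue]
  | cons b r =>
      have hb : dotFree b := h b List.mem_cons_self
      simp only [glue, List.cons_prefix_cons, List.head?_cons, Option.some.injEq]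
      rw [show (['0', '.'] : List Char) = ['0'] ++ '.' :: [] from rfl,
          prefix_wordDot b ['0'] [] r hb (by intro h; simp at h)]
      obtain ⟨u, hu⟩ := glue_head r
      simp [hu]

theorem exists_prefix_drop_cons (sub : List Char) (c : Char) (s : List Char) :
    (∃ j, sub <+: (c :: s).drop j) ↔ sub <+: (c :: s) ∨ (∃ j, sub <+: s.drop j) := by
  constructor
  · rintro ⟨j, hj⟩
    cases j with
    | zero => exact Or.inl (by simpa using hj)
    | succ j' => exact Or.inr ⟨j', by simpa using hj⟩
  · rintro (h | ⟨j, hj⟩)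
    · exact ⟨0, by simpa using h⟩
    · exact ⟨j + 1, by simpa using hj⟩

def pat : List Char := ['.', 'm', 'o', 'd', 'e', 'l', '.', '0', '.']

theorem exists_drop_append (a : List Char) (rest : List (List Char)) (ha : dotFree a) :
    (∃ j, pat <+: (a ++ glue rest).drop j)
      ↔ (pat <+: (a ++ glue rest)) ∨ (∃ j, pat <+: (glue rest).drop j) := by
  induction a with
  | nil =>
      simp only [List.nil_append]
      constructor
      · exact Or.inr
      · rintro (h | h)
        · exact ⟨0, by simpa using h⟩
        · exact h
  | cons c a' ih =>
      have ha' : dotFree a' := fun hx => ha (List.mem_cons_of_mem _ hx)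
      rw [List.cons_append, exists_prefix_drop_cons, ih ha']
      constructor
      · rintro (h1 | h2 | h3)
        · exact Or.inl h1
        · rw [show pat = ([] : List Char) ++ '.' :: ['m','o','d','e','l','.','0','.'] from rfl,
              prefix_wordDot a' [] _ rest ha' (by intro hx; simp at hx)] at h2
          exact Or.inr ⟨0, by simpa using h2.2⟩
        · exact Or.inr h3
      · rintro (h1 | h2)
        · exact Or.inl h1
        · exact Or.inr (Or.inr h2)

theorem adjB_cons_iff (a : List Char) (rest : List (List Char)) :
    adjB (a :: rest) = true ↔ (a = "model".toList ∧ rest.head? = some ['0']) ∨ adjB rest = true := by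
  cases rest <;> simp [adjB]

theorem isIn_glue (parts : List (List Char)) (h : ∀ p ∈ parts, dotFree p) :
    (∃ j, pat <+: (glue parts).drop j) ↔ adjB parts = true := by
  induction parts with
  | nil =>
      simp only [glue, adjB]
      constructor
      · rintro ⟨j, hj⟩
        have hlen := hj.length_le
        simp [pat] at hlen
        omega
      · intro hx; simp at hx
  | cons a rest ih =>
      have ha : dotFree a := h a List.mem_cons_self
      have hfr : ∀ p ∈ rest, dotFree p := fun p hp => h p (List.mem_cons_of_mem _ hp)
      have hP1 : pat <+: '.' :: (a ++ glue rest) ↔ (a = "model".toList ∧ rest.head? = some ['0']) := by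
        rw [show pat = '.' :: ("model".toList ++ '.' :: ['0', '.']) from rfl, List.cons_prefix_cons,
            prefix_wordDot a "model".toList ['0', '.'] rest ha (by intro hx; simp at hx),
            show ('.' :: ['0', '.'] : List Char) = ['.', '0', '.'] from rfl,
            startswith_glue rest hfr]
        simp
      have hM : pat <+: (a ++ glue rest) → (∃ j, pat <+: (glue rest).drop j) := by
        rw [show pat = ([] : List Char) ++ '.' :: ['m','o','d','e','l','.','0','.'] from rfl,
            prefix_wordDot a [] _ rest ha (by intro hx; simp at hx)]
        rintro ⟨-, h2⟩; exact ⟨0, by simpa using h2⟩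
      rw [show glue (a :: rest) = '.' :: (a ++ glue rest) from rfl, exists_prefix_drop_cons,
          exists_drop_append a rest ha, hP1, adjB_cons_iff, ← ih hfr]
      constructor
      · rintro (h1 | h2 | h3)
        · exact Or.inl h1
        · exact Or.inr (hM h2)
        · exact Or.inr h3
      · rintro (h1 | h2)
        · exact Or.inl h1
        · exact Or.inr (Or.inr h2)

theorem aLoop_eq (parts : List String) (s : List String) (k : Nat) (hk : parts.drop k = s) :
    aLoop parts (PySem.List.enumerate s (k : Int)) = adjB (s.map String.toList) := by
  induction s generalizing k with
  | nil => simp [PySem.List.enumerate, aLoop, adjB]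
  | cons p rest ih =>
      have hk1 : parts.drop (k + 1) = rest := by rw [← List.tail_drop, hk]; rfl
      rw [show PySem.List.enumerate (p :: rest) (k : Int)
            = ((k : Int), p) :: PySem.List.enumerate rest ((k : Int) + 1) from rfl]
      show (if p = "model" ∧ (k : Int) + 1 < (parts.length : Int)
              ∧ PySem.List.pyGetD parts ((k : Int) + 1) "" = "0" then true
            else aLoop parts (PySem.List.enumerate rest ((k : Int) + 1))) = _
      have hcast : ((k : Int) + 1) = (((k + 1 : Nat)) : Int) := by push_cast; ring
      have hget : PySem.List.pyGetD parts ((k : Int) + 1) "" = rest.headD "" := by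
        rw [hcast, PySem.List.pyGetD_natCast, List.getD_eq_getElem?_getD, ← List.head?_drop, hk1]
        cases rest <;> rfl
      have hlt : ((k : Int) + 1 < (parts.length : Int)) ↔ rest ≠ [] := by
        rw [Ne, ← hk1, List.drop_eq_nil_iff, not_le]
        exact_mod_cast Iff.rfl
      cases rest with
      | nil =>
          rw [if_neg (by rw [hlt]; rintro ⟨-, h2, -⟩; exact h2 rfl)]
          simp [PySem.List.enumerate, aLoop, adjB]
      | cons b r' =>
          have ihr := ih (k + 1) hk1
          rw [← hcast] at ihr
          by_cases hpb : p = "model" ∧ b = "0"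
          · rw [if_pos ⟨hpb.1, hlt.mpr (by simp), by rw [hget]; exact hpb.2⟩]
            simp [adjB, hpb.1, hpb.2]
          · rw [if_neg (by rintro ⟨h1, -, h3⟩; rw [hget] at h3; exact hpb ⟨h1, h3⟩)]
            rw [ihr]
            have hne : ¬ (p.toList = "model".toList ∧ b.toList = "0".toList) := by
              intro hx
              exact hpb ⟨String.toList_inj.mp hx.1, String.toList_inj.mp hx.2⟩
            simp only [List.map_cons, adjB]
            rw [Bool.or_eq_right_iff_imp.mpr]
            intro hx
            simp only [Bool.and_eq_true, beq_iff_eq] at hx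
            exact absurd hx hne

-- ===== VERDICT (by name: the statement is the Claim_ definition above) =====
theorem is_stem_layer_py_spec : Claim_equal_is_stem_layer_py := by
  intro name _
  unfold Spec_is_stem_layer_py
  cases hsp : PySem.Str.split? name "." with
  | none =>
      have hbr := PySem.Str.split?_map name "."
      rw [hsp] at hbr
      simp [PySem.Chars.split?] at hbr
  | some parts =>
      have hmap : parts.map String.toList = splitDot name.toList := by
        have hbr := PySem.Str.split?_map name "."
        rw [hsp] at hbr
        exact Option.some.inj (by simpa [PySem.Chars.split?, splitOn_eq_splitDot] using hbr)
      have hne : parts ≠ [] := by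
        intro h
        exact splitDot_ne_nil name.toList (by rw [← hmap, h]; rfl)
      have hdf : ∀ p ∈ parts.map String.toList, dotFree p := by
        rw [hmap]; exact splitDot_dotFree _
      have hA1 : aLoop parts (PySem.List.enumerate parts) = adjB (parts.map String.toList) := by
        have := aLoop_eq parts parts 0 (by simp)
        simpa using this
      have hA2 : (PySem.List.pyGetD parts 0 "" = "0")
          ↔ (parts.map String.toList).head? = some ['0'] := by
        cases parts with
        | nil => exact absurd rfl hne
        | cons q qs =>
            rw [show (0 : Int) = ((0 : Nat) : Int) from rfl, PySem.List.pyGetD_natCast]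
            simp only [List.getD_cons_zero, List.map_cons, List.head?_cons, Option.some.injEq]
            constructor
            · intro hq; rw [hq]; rfl
            · intro hq; exact String.toList_inj.mp (by rw [hq]; rfl)
      have hin : PySem.Chars.isIn pat (glue (parts.map String.toList))
          = adjB (parts.map String.toList) := by
        rcases hb : adjB (parts.map String.toList) with _ | _
        · rcases hi : PySem.Chars.isIn pat (glue (parts.map String.toList)) with _ | _
          · rfl
          · have := (PySem.Chars.exists_prefix_drop_iff_isIn pat _).mpr hi
            rw [isIn_glue _ hdf] at this
            rw [this] at hb; cases hb
        · exact (PySem.Chars.exists_prefix_drop_iff_isIn pat _).mp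
            ((isIn_glue _ hdf).mpr hb)
      have hsw : PySem.Chars.startswith (glue (parts.map String.toList)) ['.', '0', '.'] = true
          ↔ (parts.map String.toList).head? = some ['0'] := by
        rw [PySem.Chars.startswith_iff]
        exact startswith_glue _ hdf
      have hwrap : ("." ++ name ++ ".").toList = glue (parts.map String.toList) := by
        rw [hmap, glue_splitDot]; simp
      unfold is_stem_layer_py is_stem_layer_py_alt
      rw [hsp]
      show (if aLoop parts (PySem.List.enumerate parts) then true
            else if PySem.List.pyGetD parts 0 "" = "0" then true else false)
          = (PySem.Str.isIn ".model.0." ("." ++ name ++ ".")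
              || PySem.Str.startswith ("." ++ name ++ ".") ".0.")
      rw [PySem.Str.isIn_eq, PySem.Str.startswith_eq, hwrap,
          show (".model.0." : String).toList = pat from rfl,
          show (".0." : String).toList = ['.', '0', '.'] from rfl, hA1, hin]
      cases hadj : adjB (parts.map String.toList) with
      | true => simp
      | false =>
          simp only [Bool.false_eq_true, if_false, Bool.false_or]
          by_cases hh : (parts.map String.toList).head? = some ['0']
          · rw [if_pos (hA2.mpr hh), (hsw.mpr hh)]
          · rw [if_neg (fun hx => hh (hA2.mp hx))]
            rcases hs2 : PySem.Chars.startswith (glue (parts.map String.toList)) ['.', '0', '.'] with _ | _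
            · rfl
            · exact absurd (hsw.mp hs2) hh
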